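-- pv_equiv track=rewrite | github.com/kun0906/endet | model/rnn.py | get_batch_data
-- ===== SOURCE A (Python) =====
-- def get_batch_data(data_tuple, size=32, last_batch=True):
--     """Get each batch instances (each instance has variable length)
--
--     Parameters
--     ----------
--     data_tuple: tuple
--         (X, y)
--
--     size: int
--         The number of instances in each batch
--
--     last_batch: boolean
--         It return the last batch instances if True, otherwise, just drop the last one.
--
--     Returns
--     -------
--         A batch of instances
--
--     """
--     X = []
--     Y = []
--     cnt = 0
--     for i, (x, y) in enumerate(data_tuple):
--         X.append(x)
--         Y.append(y)
--         cnt += 1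
--         if cnt >= size:
--             yield X, Y
--             X = []
--             Y = []
--             cnt = 0
--
--     if last_batch and len(X) > 0:
--         yield X, Y
-- ===== SOURCE B (Python) =====
-- def get_batch_data(data_tuple, size=32, last_batch=True):
--     pairs = list(data_tuple)
--     n = len(pairs)
--     bound = n if last_batch else (n // size) * size
--     for i in range(0, bound, size):
--         batch = pairs[i:i + size]
--         yield [x for x, y in batch], [y for x, y in batch]
-- ===== Notes on version B (the rewrite author's own statement) =====
-- stated objective: simpler
-- what changed: Replaced A's accumulate-and-flush pass (mutable X/Y/cnt lists with a flush inside the loop plus a trailing partial-batch check) by materialize-then-slice: compute the range bound once (n, or (n // size) * size to drop the tail) and yield list slices pairs[i:i+size].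
-- outside the precondition, e.g. on get_batch_data([([1], 2)], 0, True): A returns [([[1]], [2])], B raises ValueError; on get_batch_data([([1], 2)], -1, True): A returns [([[1]], [2])], B returns []
import Mathlib
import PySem

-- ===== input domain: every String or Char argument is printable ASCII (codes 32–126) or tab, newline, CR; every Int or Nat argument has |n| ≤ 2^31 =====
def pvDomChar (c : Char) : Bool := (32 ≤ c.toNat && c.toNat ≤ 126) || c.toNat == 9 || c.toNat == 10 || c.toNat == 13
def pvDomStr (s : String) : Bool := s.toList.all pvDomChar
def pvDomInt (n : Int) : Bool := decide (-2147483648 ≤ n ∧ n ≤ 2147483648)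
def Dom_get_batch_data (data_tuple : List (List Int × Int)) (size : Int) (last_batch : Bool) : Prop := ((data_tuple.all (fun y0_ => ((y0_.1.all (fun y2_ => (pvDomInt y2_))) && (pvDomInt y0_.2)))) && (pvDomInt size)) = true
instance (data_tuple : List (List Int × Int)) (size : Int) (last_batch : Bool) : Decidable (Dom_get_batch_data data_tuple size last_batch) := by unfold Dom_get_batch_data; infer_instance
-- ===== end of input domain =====

-- B replaces A's accumulate-and-flush batching by collect-then-slice (range over batch starts);
-- equivalence is about the list of yielded batches (both Pythons are generators).

-- ===== PORT A =====
-- one loop iteration of A: append x/y, bump cnt, flush the batch when cnt >= size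
def getBatchStepA (size : Int)
    (st : List (List (List Int) × List Int) × List (List Int) × List Int × Int)
    (p : List Int × Int) :
    List (List (List Int) × List Int) × List (List Int) × List Int × Int :=
  let X := st.2.1 ++ [p.1]
  let Y := st.2.2.1 ++ [p.2]
  let cnt := st.2.2.2 + 1
  if size ≤ cnt then (st.1 ++ [(X, Y)], [], [], 0) else (st.1, X, Y, cnt)

def get_batch_data (data_tuple : List (List Int × Int)) (size : Int) (last_batch : Bool) : List (List (List Int) × List Int) :=
  let s := data_tuple.foldl (getBatchStepA size) ([], [], [], 0)
  if last_batch && decide (0 < s.2.1.length) then s.1 ++ [(s.2.1, s.2.2.1)] else s.1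

-- ===== PORT B =====
def get_batch_data_alt (data_tuple : List (List Int × Int)) (size : Int) (last_batch : Bool) : List (List (List Int) × List Int) :=
  let n : Int := data_tuple.length
  let bound : Int := if last_batch then n else (PySem.Int.floordiv n size) * size
  (PySem.List.pyRange 0 bound size).map (fun i =>
    let batch := PySem.List.slice data_tuple (some i) (some (i + size))
    (batch.map (fun p => p.1), batch.map (fun p => p.2)))

-- ===== PRECONDITION & SPEC =====
-- Pre_ restricts to the natural domain of positive batch sizes: for size ≤ 0 (outside any caller's
-- intent) A's value (one-element batches) is an artefact of its cnt >= size test, and B's range step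
-- raises ValueError at size = 0 and yields nothing for negative size.
def Pre_get_batch_data (data_tuple : List (List Int × Int)) (size : Int) (last_batch : Bool) : Prop := 1 ≤ size
instance (data_tuple : List (List Int × Int)) (size : Int) (last_batch : Bool) : Decidable (Pre_get_batch_data data_tuple size last_batch) := by unfold Pre_get_batch_data; infer_instance
def pvWitness_get_batch_data : (List (List Int × Int)) × Int × Bool := ([([1], 2), ([3, 4], 5), ([6], 7)], 2, true)

def Spec_get_batch_data (data_tuple : List (List Int × Int)) (size : Int) (last_batch : Bool) (out : List (List (List Int) × List Int)) : Prop := out = get_batch_data_alt data_tuple size last_batch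
instance (data_tuple : List (List Int × Int)) (size : Int) (last_batch : Bool) (out : List (List (List Int) × List Int)) : Decidable (Spec_get_batch_data data_tuple size last_batch out) := by unfold Spec_get_batch_data; infer_instance

-- ===== CLAIM (what is proved, stated in full; the proofs are below) =====
def Claim_equal_get_batch_data : Prop := ∀ (data_tuple : List (List Int × Int)) (size : Int) (last_batch : Bool), Dom_get_batch_data data_tuple size last_batch → Pre_get_batch_data data_tuple size last_batch → Spec_get_batch_data data_tuple size last_batch (get_batch_data data_tuple size last_batch)

-- ===== LEMMAS AND PROOFS =====

-- reference decomposition used by the proofs only: the full batches and the remainder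
def fullB (t : Nat) (l : List (List Int × Int)) : List (List (List Int) × List Int) :=
  if _h : 0 < t ∧ t ≤ l.length then
    ((l.take t).map (fun p => p.1), (l.take t).map (fun p => p.2)) :: fullB t (l.drop t)
  else []
termination_by l.length
decreasing_by simp [List.length_drop]; omega

def remB (t : Nat) (l : List (List Int × Int)) : List (List Int × Int) :=
  if _h : 0 < t ∧ t ≤ l.length then remB t (l.drop t) else l
termination_by l.length
decreasing_by simp [List.length_drop]; omega

-- no flush happens while cnt + (number of remaining items) stays below size
lemma foldlA_noflush (size : Int) (l : List (List Int × Int)) :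
    ∀ (out : List (List (List Int) × List Int)) (X : List (List Int)) (Y : List Int) (cnt : Int),
    cnt + l.length < size →
    l.foldl (getBatchStepA size) (out, X, Y, cnt)
      = (out, X ++ l.map (fun p => p.1), Y ++ l.map (fun p => p.2), cnt + l.length) := by
  induction l with
  | nil => intro out X Y cnt _; simp
  | cons p l ih =>
    intro out X Y cnt h
    simp only [List.foldl_cons, getBatchStepA]
    rw [if_neg (by simp at h; omega)]
    rw [ih out (X ++ [p.1]) (Y ++ [p.2]) (cnt + 1) (by simp at h ⊢; omega)]
    simp; omega

-- consuming exactly `size` items from a fresh batch state flushes exactly one batch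
lemma foldlA_chunk (size : Int) (hs : 1 ≤ size) (l : List (List Int × Int))
    (hl : l.length = size.toNat) (out : List (List (List Int) × List Int)) :
    l.foldl (getBatchStepA size) (out, [], [], 0)
      = (out ++ [(l.map (fun p => p.1), l.map (fun p => p.2))], [], [], 0) := by
  have hst : (size.toNat : Int) = size := Int.toNat_of_nonneg (by omega)
  have ht : 1 ≤ size.toNat := by omega
  have hlen1 : (l.drop (size.toNat - 1)).length = 1 := by simp [hl]; omega
  obtain ⟨e, he⟩ := List.length_eq_one_iff.mp hlen1
  have hsplit : l = l.take (size.toNat - 1) ++ [e] := by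
    conv_lhs => rw [← List.take_append_drop (size.toNat - 1) l]
    rw [he]
  have hlt : (l.take (size.toNat - 1)).length = size.toNat - 1 := by simp [hl]
  conv_lhs => rw [hsplit]
  rw [List.foldl_append,
      foldlA_noflush size _ out [] [] 0 (by rw [hlt]; omega)]
  simp only [List.foldl_cons, List.foldl_nil, getBatchStepA]
  rw [if_pos (by rw [hlt]; omega)]
  conv_rhs => rw [hsplit]
  simp

lemma foldlA_closed (size : Int) (hs : 1 ≤ size) :
    ∀ (l : List (List Int × Int)) (out : List (List (List Int) × List Int)),
    l.foldl (getBatchStepA size) (out, [], [], 0)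
      = (out ++ fullB size.toNat l,
         (remB size.toNat l).map (fun p => p.1),
         (remB size.toNat l).map (fun p => p.2),
         ((remB size.toNat l).length : Int)) := by
  have hst : (size.toNat : Int) = size := Int.toNat_of_nonneg (by omega)
  intro l
  induction l using remB.induct (t := size.toNat) with
  | case1 l h ih =>
    intro out
    conv_lhs => rw [← List.take_append_drop size.toNat l]
    rw [List.foldl_append,
        foldlA_chunk size hs _ (by simp; omega) out,
        ih (out ++ [((l.take size.toNat).map (fun p => p.1), (l.take size.toNat).map (fun p => p.2))])]
    conv_rhs => rw [fullB, remB]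
    simp only [dif_pos h]
    simp
  
  | case2 l h =>
    intro out
    rw [foldlA_noflush size l out [] [] 0 (by omega)]
    conv_rhs => rw [fullB, remB]
    simp only [dif_neg h]
    simp

lemma pyRange_pos_nil (a b s : Int) (hs : 0 < s) (h : b ≤ a) : PySem.List.pyRange a b s = [] := by
  rw [PySem.List.pyRange_of_pos a b hs]
  simp [show ¬ a < b by omega]

lemma pyRange_pos_shift (a b s : Int) (hs : 0 < s) :
    PySem.List.pyRange (a + s) b s = (PySem.List.pyRange a (b - s) s).map (· + s) := by
  rw [PySem.List.pyRange_of_pos (a + s) b hs, PySem.List.pyRange_of_pos a (b - s) hs]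
  rw [List.map_map]
  have harg : b - (a + s) + s - 1 = b - s - a + s - 1 := by ring
  simp only [harg, show (a + s < b) ↔ (a < b - s) from by omega]
  exact List.map_congr_left (fun k _ => by simp; ring)

lemma pyRange_pos_cons (a b s : Int) (hs : 0 < s) (h : a < b) :
    PySem.List.pyRange a b s = a :: PySem.List.pyRange (a + s) b s := by
  have key : (if a < b then ((b - a + s - 1) / s).toNat else 0)
      = (if a + s < b then ((b - (a + s) + s - 1) / s).toNat else 0) + 1 := by
    rw [if_pos h]
    by_cases h2 : a + s < b
    · rw [if_pos h2]
      have e1 : b - a + s - 1 = (b - (a + s) + s - 1) + 1 * s := by ring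
      rw [e1, Int.add_mul_ediv_right _ _ (by omega)]
      have hnn : 0 ≤ (b - (a + s) + s - 1) / s := Int.ediv_nonneg (by omega) (by omega)
      omega
    · rw [if_neg h2]
      have h1 : 1 ≤ (b - a + s - 1) / s := (Int.le_ediv_iff_mul_le hs).mpr (by omega)
      have h2' : (b - a + s - 1) / s < 2 := (Int.ediv_lt_iff_lt_mul hs).mpr (by omega)
      omega
  rw [PySem.List.pyRange_of_pos a b hs, PySem.List.pyRange_of_pos (a + s) b hs, key,
      List.range_succ_eq_map, List.map_cons, List.map_map]
  congr 1
  · simp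
  · exact List.map_congr_left (fun k _ => by simp [Function.comp, Nat.succ_eq_add_one]; ring)

-- the batches after the first are the batches of the list with its first chunk dropped
lemma tail_shift (size : Int) (hs : 1 ≤ size) (l : List (List Int × Int)) (bound : Int) :
    (PySem.List.pyRange size bound size).map (fun i =>
        ((PySem.List.slice l (some i) (some (i + size))).map (fun p => p.1),
         (PySem.List.slice l (some i) (some (i + size))).map (fun p => p.2)))
      = (PySem.List.pyRange 0 (bound - size) size).map (fun i =>
        ((PySem.List.slice (l.drop size.toNat) (some i) (some (i + size))).map (fun p => p.1),
         (PySem.List.slice (l.drop size.toNat) (some i) (some (i + size))).map (fun p => p.2))) := by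
  rw [show PySem.List.pyRange size bound size = PySem.List.pyRange (0 + size) bound size from by norm_num]
  rw [pyRange_pos_shift 0 bound size (by omega), List.map_map]
  apply List.map_congr_left
  intro i hi
  have hi0 : 0 ≤ i := ((PySem.List.mem_pyRange_iff_of_pos (by omega) i).mp hi).1
  simp only [Function.comp]
  rw [PySem.List.slice_toNat l (by omega) (by omega),
      PySem.List.slice_toNat (l.drop size.toNat) (by omega) (by omega),
      List.drop_drop]
  have e1 : (i + size + size).toNat - (i + size).toNat = (i + size).toNat - i.toNat := by omega
  have e2 : (i + size).toNat = size.toNat + i.toNat := by omega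
  rw [e1, e2]

-- B with last_batch = False yields exactly the full chunks
lemma B_false_closed (size : Int) (hs : 1 ≤ size) :
    ∀ (l : List (List Int × Int)),
    (PySem.List.pyRange 0 (PySem.Int.floordiv (l.length : Int) size * size) size).map (fun i =>
        ((PySem.List.slice l (some i) (some (i + size))).map (fun p => p.1),
         (PySem.List.slice l (some i) (some (i + size))).map (fun p => p.2)))
      = fullB size.toNat l := by
  have hst : (size.toNat : Int) = size := Int.toNat_of_nonneg (by omega)
  intro l
  induction l using remB.induct (t := size.toNat) with
  | case1 l h ih =>
    have hfd : PySem.Int.floordiv (l.length : Int) size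
        = PySem.Int.floordiv ((l.drop size.toNat).length : Int) size + 1 := by
      rw [PySem.Int.floordiv_eq_ediv_of_pos (by omega), PySem.Int.floordiv_eq_ediv_of_pos (by omega)]
      rw [show ((l.length : Int)) = ((l.drop size.toNat).length : Int) + 1 * size from by simp; omega]
      rw [Int.add_mul_ediv_right _ _ (by omega)]
    have hq0 : 0 ≤ PySem.Int.floordiv ((l.drop size.toNat).length : Int) size := by
      rw [PySem.Int.floordiv_eq_ediv_of_pos (by omega)]
      exact Int.ediv_nonneg (by omega) (by omega)
    rw [hfd, pyRange_pos_cons 0 _ size (by omega) (by nlinarith), List.map_cons]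
    simp only [zero_add]
    rw [fullB, dif_pos h]
    congr 1
    · rw [PySem.List.slice_toNat l (by omega) (by omega)]
      simp
    · rw [tail_shift size hs l _,
          show (PySem.Int.floordiv ((l.drop size.toNat).length : Int) size + 1) * size - size
            = PySem.Int.floordiv ((l.drop size.toNat).length : Int) size * size from by ring]
      exact ih
  | case2 l h =>
    have h0 : PySem.Int.floordiv (l.length : Int) size = 0 := by
      rw [PySem.Int.floordiv_eq_ediv_of_pos (by omega)]
      exact Int.ediv_eq_zero_of_lt (by omega) (by omega)
    rw [h0, zero_mul, pyRange_pos_nil 0 0 size (by omega) le_rfl]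
    rw [fullB, dif_neg h]
    simp

-- B with last_batch = True yields the full chunks plus the non-empty remainder
lemma B_true_closed (size : Int) (hs : 1 ≤ size) :
    ∀ (l : List (List Int × Int)),
    (PySem.List.pyRange 0 (l.length : Int) size).map (fun i =>
        ((PySem.List.slice l (some i) (some (i + size))).map (fun p => p.1),
         (PySem.List.slice l (some i) (some (i + size))).map (fun p => p.2)))
      = fullB size.toNat l ++
        (if remB size.toNat l = [] then []
         else [((remB size.toNat l).map (fun p => p.1), (remB size.toNat l).map (fun p => p.2))]) := by
  have hst : (size.toNat : Int) = size := Int.toNat_of_nonneg (by omega)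
  intro l
  induction l using remB.induct (t := size.toNat) with
  | case1 l h ih =>
    rw [pyRange_pos_cons 0 _ size (by omega) (by omega), List.map_cons]
    simp only [zero_add]
    rw [fullB, remB, dif_pos h, dif_pos h, List.cons_append]
    congr 1
    · rw [PySem.List.slice_toNat l (by omega) (by omega)]
      simp
    · rw [tail_shift size hs l _,
          show ((l.length : Int)) - size = ((l.drop size.toNat).length : Int) from by simp; omega]
      exact ih
  | case2 l h =>
    rw [fullB, remB, dif_neg h, dif_neg h]
    by_cases hl : l = []
    · subst hl
      rw [show ((([] : List (List Int × Int)).length : Int)) = 0 from by simp,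
          pyRange_pos_nil 0 0 size (by omega) le_rfl]
      simp
    · have hlen : size.toNat > l.length := by omega
      rw [pyRange_pos_cons 0 _ size (by omega) (by simp [List.length_pos_iff, hl]),
          zero_add, pyRange_pos_nil size _ size (by omega) (by omega), List.map_cons, List.map_nil]
      rw [PySem.List.slice_toNat l (by omega) (by omega)]
      rw [if_neg hl]
      simp [List.take_of_length_le (show l.length ≤ size.toNat by omega)]

-- B's closed form, for either value of last_batch
lemma B_closed (size : Int) (hs : 1 ≤ size) (lb : Bool) :
    ∀ (l : List (List Int × Int)),
    get_batch_data_alt l size lb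
      = fullB size.toNat l ++
        (if lb && decide (remB size.toNat l ≠ []) then
          [((remB size.toNat l).map (fun p => p.1), (remB size.toNat l).map (fun p => p.2))]
        else []) := by
  intro l
  cases lb with
  | false =>
    simp only [get_batch_data_alt, Bool.false_and, if_false, Bool.false_eq_true, List.append_nil]
    exact B_false_closed size hs l
  | true =>
    simp only [get_batch_data_alt, Bool.true_and, if_true]
    rw [B_true_closed size hs l]
    by_cases hl : remB size.toNat l = [] <;> simp [hl]

-- ===== VERDICT (by name: the statement is the Claim_ definition above) =====
theorem get_batch_data_spec : Claim_equal_get_batch_data := by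
  intro l size lb _ hs
  unfold Spec_get_batch_data get_batch_data
  rw [B_closed size hs lb l, foldlA_closed size hs l []]
  simp only [List.nil_append]
  rcases lb with _ | _
  · simp
  · by_cases h : remB size.toNat l = [] <;> simp [h]
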